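-- pv_equiv track=rewrite | github.com/chiralcentre/Kattis | disastrousdoubling.py | bacteria_left
-- ===== SOURCE A (Python) =====
-- def bacteria_left(n,experiments):
--     balance = 1
--     for i in range(n):
--         balance *= 2
--         used = experiments[i]
--         if used > balance:
--             return "error"
--         balance -= used
--     return str(balance%(10**9+7))
-- ===== SOURCE B (Python) =====
-- def bacteria_left(n, experiments):
--     # Two-phase: exact balance only while it is <= 2^31 (the max possible 'used');
--     # once larger, no experiment can ever exceed it, so switch to O(1)-word modular arithmetic.
--     P = 10 ** 9 + 7
--     CAP = 1 << 31
--     bal = 1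
--     i = 0
--     while i < n and bal <= CAP:
--         used = experiments[i]
--         bal *= 2
--         if used > bal:
--             return "error"
--         bal -= used
--         i += 1
--     m = bal % P
--     while i < n:
--         m = (m * 2 - experiments[i]) % P
--         i += 1
--     return str(m)
-- ===== Notes on version B (the rewrite author's own statement) =====
-- stated objective: alternative
-- what changed: A carries the exact (unboundedly growing) big-int balance through all n steps; B keeps the exact balance only while it is <= 2^31 (the maximum possible experiment value under the input domain) and from the first moment it exceeds that bound -- after which 'used > balance' can never fire -- finishes with single-word arithmetic mod 10^9+7; on inputs that double for long this avoids A's huge-integer arithmetic. Pre_ excludes exactly the inputs where A raises IndexError (n exceeds the list length and no experiment triggers an early 'error' return); B raises IndexError there too.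
import Mathlib
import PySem

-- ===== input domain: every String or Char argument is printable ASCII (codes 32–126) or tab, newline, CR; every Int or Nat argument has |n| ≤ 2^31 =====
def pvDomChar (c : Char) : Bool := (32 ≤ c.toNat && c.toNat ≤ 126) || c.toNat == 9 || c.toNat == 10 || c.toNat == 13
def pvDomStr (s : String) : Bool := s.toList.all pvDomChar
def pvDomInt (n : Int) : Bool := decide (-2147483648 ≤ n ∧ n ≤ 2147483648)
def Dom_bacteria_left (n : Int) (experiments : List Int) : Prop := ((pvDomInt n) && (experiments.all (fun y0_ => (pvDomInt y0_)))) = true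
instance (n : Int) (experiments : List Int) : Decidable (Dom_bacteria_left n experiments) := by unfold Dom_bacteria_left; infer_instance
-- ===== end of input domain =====

-- B replaces A's exact big-int balance (which can grow without bound) by an exact phase only
-- while the balance is ≤ 2^31, then single-word arithmetic mod 10^9+7 (objective: alternative).

-- ===== PORT A =====
-- the for-loop over range(n) (range is lazy, so the index is stepped, not materialized):
-- early return "error" = some "error"; IndexError = none
def aLoop (xs : List Int) (n : Int) (i : Int) (balance : Int) : Option String :=
  if _h : i < n then
    let balance := balance * 2
    match PySem.List.pyGet? xs i with
    | none => none
    | some used =>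
        if used > balance then some "error"
        else aLoop xs n (i + 1) (balance - used)
  else some (PySem.Int.toStr (PySem.Int.mod balance (10 ^ 9 + 7)))
termination_by (n - i).toNat
decreasing_by omega

def bacteria_left (n : Int) (experiments : List Int) : String :=
  (aLoop experiments n 0 1).getD ""

-- ===== PORT B =====
-- the first while-loop of Source B ('while i < n and bal <= CAP'):
-- none = IndexError, some none = early return "error", some (some (i, bal)) = loop exit state
def bPhase1 (xs : List Int) (n : Int) (i : Int) (bal : Int) : Option (Option (Int × Int)) :=
  if _h : i < n ∧ bal ≤ 2147483648 then
    match PySem.List.pyGet? xs i with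
    | none => none
    | some used =>
        if used > bal * 2 then some none
        else bPhase1 xs n (i + 1) (bal * 2 - used)
  else some (some (i, bal))
termination_by (n - i).toNat
decreasing_by omega

-- the second while-loop of Source B; none = IndexError
def bPhase2 (xs : List Int) (n : Int) (i : Int) (m : Int) : Option Int :=
  if _h : i < n then
    match PySem.List.pyGet? xs i with
    | none => none
    | some used => bPhase2 xs n (i + 1) (PySem.Int.mod (m * 2 - used) (10 ^ 9 + 7))
  else some m
termination_by (n - i).toNat
decreasing_by omega

def bacteria_left_alt (n : Int) (experiments : List Int) : String :=
  (match bPhase1 experiments n 0 1 with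
   | none => none
   | some none => some "error"
   | some (some (i, bal)) =>
       (bPhase2 experiments n i (PySem.Int.mod bal (10 ^ 9 + 7))).map PySem.Int.toStr).getD ""

-- ===== PRECONDITION & SPEC =====
-- Pre_ excludes exactly the inputs on which A raises IndexError: those with n > len(experiments)
-- on which no experiment triggers the early "error" return within the list (the balance before
-- step k is 2^k - Σ_{i<k} 2^(k-1-i)·experiments[i], so "error" fires at some k iff the stated
-- sum inequality holds for some k); B raises IndexError on those inputs too.
def Pre_bacteria_left (n : Int) (experiments : List Int) : Prop :=
  n ≤ (experiments.length : Int) ∨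
  ∃ k ∈ List.range experiments.length,
    experiments.getD k 0 >
      ((2 ^ (k + 1) : Nat) : Int)
        - (((List.range k).map (fun i => ((2 ^ (k - i) : Nat) : Int) * experiments.getD i 0)).sum)
instance (n : Int) (experiments : List Int) : Decidable (Pre_bacteria_left n experiments) := by
  unfold Pre_bacteria_left; infer_instance
def pvWitness_bacteria_left : Int × List Int := (2, [1, 3])

def Spec_bacteria_left (n : Int) (experiments : List Int) (out : String) : Prop := out = bacteria_left_alt n experiments
instance (n : Int) (experiments : List Int) (out : String) : Decidable (Spec_bacteria_left n experiments out) := by unfold Spec_bacteria_left; infer_instance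

-- ===== CLAIM (what is proved, stated in full; the proofs are below) =====
def Claim_equal_bacteria_left : Prop := ∀ (n : Int) (experiments : List Int), Dom_bacteria_left n experiments → Pre_bacteria_left n experiments → Spec_bacteria_left n experiments (bacteria_left n experiments)

-- ===== LEMMAS AND PROOFS =====

-- A's loop, rephrased on the list of experiment values it actually reads
def aList : List Int → Int → String
  | [], bal => PySem.Int.toStr (PySem.Int.mod bal (10 ^ 9 + 7))
  | used :: r, bal =>
      if used > bal * 2 then "error" else aList r (bal * 2 - used)

-- B's first loop, rephrased on the list of values it reads (none = early "error")
def bExactL : List Int → Int → Option (List Int × Int)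
  | [], bal => some ([], bal)
  | used :: r, bal =>
      if bal ≤ 2147483648 then
        if used > bal * 2 then none
        else bExactL r (bal * 2 - used)
      else some (used :: r, bal)

-- B's second loop, rephrased on the list of values it reads
def mfold (rest : List Int) (m : Int) : Int :=
  rest.foldl (fun m used => PySem.Int.mod (m * 2 - used) (10 ^ 9 + 7)) m

-- "the early 'error' return fires somewhere while reading this list, starting from balance bal"
def errs : List Int → Int → Prop
  | [], _ => False
  | u :: r, bal => u > bal * 2 ∨ errs r (bal * 2 - u)

theorem sum_shift (u : Int) (r : List Int) (j : Nat) :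
    (((List.range (j + 1)).map
        (fun i => ((2 ^ (j + 1 - i) : Nat) : Int) * (u :: r).getD i 0)).sum)
      = ((2 ^ (j + 1) : Nat) : Int) * u
        + (((List.range j).map (fun i => ((2 ^ (j - i) : Nat) : Int) * r.getD i 0)).sum) := by
  rw [List.range_succ_eq_map, List.map_cons, List.map_map, List.sum_cons]
  have hm : List.map ((fun i => ((2 ^ (j + 1 - i) : Nat) : Int) * (u :: r).getD i 0) ∘ Nat.succ)
        (List.range j)
      = List.map (fun i => ((2 ^ (j - i) : Nat) : Int) * r.getD i 0) (List.range j) := by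
    apply List.map_congr_left
    intro i hi
    simp [Function.comp, Nat.succ_sub_succ]
  rw [hm]
  simp

theorem errs_iff : ∀ (l : List Int) (bal : Int),
    errs l bal ↔ ∃ k ∈ List.range l.length,
      l.getD k 0 > ((2 ^ (k + 1) : Nat) : Int) * bal
        - (((List.range k).map (fun i => ((2 ^ (k - i) : Nat) : Int) * l.getD i 0)).sum) := by
  intro l
  induction l with
  | nil => intro bal; simp [errs]
  | cons u r ih =>
      intro bal
      constructor
      · rintro (h | h)
        · refine ⟨0, by simp, ?_⟩
          simpa using (show 2 * bal < u by linarith)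
        · obtain ⟨j, hj, hc⟩ := (ih (bal * 2 - u)).1 h
          refine ⟨j + 1, by simp only [List.mem_range, List.length_cons] at hj ⊢; omega, ?_⟩
          simp only [List.getD_cons_succ]
          rw [sum_shift]
          have he : ((2 ^ (j + 1 + 1) : Nat) : Int) * bal - (((2 ^ (j + 1) : Nat) : Int) * u
              + (((List.range j).map (fun i => ((2 ^ (j - i) : Nat) : Int) * r.getD i 0)).sum))
            = ((2 ^ (j + 1) : Nat) : Int) * (bal * 2 - u)
              - (((List.range j).map (fun i => ((2 ^ (j - i) : Nat) : Int) * r.getD i 0)).sum) := by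
            push_cast [pow_succ]
            ring
          rw [he]; exact hc
      · rintro ⟨k, hk, hc⟩
        cases k with
        | zero =>
            left
            have h0 : 2 * bal < u := by simpa using hc
            omega
        | succ j =>
            right
            apply (ih (bal * 2 - u)).2
            refine ⟨j, by simp only [List.mem_range, List.length_cons] at hk ⊢; omega, ?_⟩
            simp only [List.getD_cons_succ] at hc
            rw [sum_shift] at hc
            have he : ((2 ^ (j + 1 + 1) : Nat) : Int) * bal - (((2 ^ (j + 1) : Nat) : Int) * u
                + (((List.range j).map (fun i => ((2 ^ (j - i) : Nat) : Int) * r.getD i 0)).sum))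
              = ((2 ^ (j + 1) : Nat) : Int) * (bal * 2 - u)
                - (((List.range j).map (fun i => ((2 ^ (j - i) : Nat) : Int) * r.getD i 0)).sum) := by
              push_cast [pow_succ]
              ring
            rw [he] at hc
            exact hc

theorem errs_cap_false : ∀ (l : List Int) (bal : Int),
    (∀ u ∈ l, u ≤ 2147483648) → 2147483648 < bal → ¬ errs l bal := by
  intro l
  induction l with
  | nil => intro bal _ _ h; exact h
  | cons u r ih =>
      intro bal hb hc h
      have hu : u ≤ 2147483648 := hb u (by simp)
      rcases h with h | h
      · omega
      · exact ih (bal * 2 - u) (fun x hx => hb x (by simp [hx])) (by omega) h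

theorem drop_cons_facts {xs : List Int} {a : Int} {u : Int} {r : List Int}
    (ha : 0 ≤ a) (hd : xs.drop a.toNat = u :: r) :
    a.toNat < xs.length ∧ PySem.List.pyGet? xs a = some u ∧ xs.drop (a + 1).toNat = r := by
  have hlen : a.toNat < xs.length := by
    by_contra hge
    rw [List.drop_eq_nil_of_le (by omega)] at hd
    exact List.cons_ne_nil u r hd.symm
  have hget0 : (xs.drop a.toNat)[0]'(by rw [List.length_drop]; omega) = xs[a.toNat] := by
    simp [List.getElem_drop]
  have hu : xs[a.toNat] = u := by rw [← hget0]; simp [hd]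
  refine ⟨hlen, ?_, ?_⟩
  · rw [PySem.List.pyGet?_of_nonneg xs ha, List.getElem?_eq_getElem hlen, hu]
  · have h1 : (a + 1).toNat = a.toNat + 1 := by omega
    rw [h1, ← List.tail_drop, hd, List.tail_cons]

theorem aLoop_err : ∀ (l : List Int) (bal : Int) (xs : List Int) (n a : Int),
    0 ≤ a → xs.drop a.toNat = l → (xs.length : Int) < n → errs l bal →
    aLoop xs n a bal = some "error" := by
  intro l
  induction l with
  | nil => intro bal xs n a _ _ _ h; exact absurd h (fun h => h)
  | cons u r ih =>
      intro bal xs n a ha hd hn herr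
      obtain ⟨hlen, hget, hdr⟩ := drop_cons_facts ha hd
      rw [aLoop, dif_pos (by omega : a < n)]
      simp only [hget]
      by_cases hc : u > bal * 2
      · simp [hc]
      · rw [if_neg hc]
        rcases herr with h | h
        · exact absurd h hc
        · exact ih (bal * 2 - u) xs n (a + 1) (by omega) hdr hn h

theorem bPhase1_err : ∀ (l : List Int) (bal : Int) (xs : List Int) (n a : Int),
    0 ≤ a → xs.drop a.toNat = l → (xs.length : Int) < n → (∀ u ∈ l, u ≤ 2147483648) →
    errs l bal → bPhase1 xs n a bal = some none := by
  intro l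
  induction l with
  | nil => intro bal xs n a _ _ _ _ h; exact absurd h (fun h => h)
  | cons u r ih =>
      intro bal xs n a ha hd hn hb herr
      by_cases hcap : bal ≤ 2147483648
      · obtain ⟨hlen, hget, hdr⟩ := drop_cons_facts ha hd
        rw [bPhase1, dif_pos ⟨by omega, hcap⟩]
        simp only [hget]
        by_cases hc : u > bal * 2
        · simp [hc]
        · rw [if_neg hc]
          rcases herr with h | h
          · exact absurd h hc
          · exact ih (bal * 2 - u) xs n (a + 1) (by omega) hdr hn
              (fun x hx => hb x (by simp [hx])) h
      · exact absurd herr (errs_cap_false (u :: r) bal hb (by omega))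

theorem aLoop_eq_aList (xs : List Int) (n : Int) (hn : n ≤ (xs.length : Int)) :
    ∀ (k : Nat) (a : Int), 0 ≤ a → n - a ≤ (k : Int) →
      ∀ bal, aLoop xs n a bal = some (aList ((xs.take n.toNat).drop a.toNat) bal) := by
  intro k
  induction k with
  | zero =>
      intro a ha hk bal
      have hna : ¬ a < n := by omega
      rw [aLoop, dif_neg hna]
      have hnil : (xs.take n.toNat).drop a.toNat = [] := by
        apply List.drop_eq_nil_of_le
        have := List.length_take_le n.toNat xs
        omega
      rw [hnil, aList]
  | succ m ih =>
      intro a ha hk bal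
      by_cases hlt : a < n
      · have halt : a.toNat < xs.length := by omega
        have hget : PySem.List.pyGet? xs a = some (xs[a.toNat]'halt) := by
          rw [PySem.List.pyGet?_of_nonneg xs ha]; exact List.getElem?_eq_getElem halt
        have htlt : a.toNat < (xs.take n.toNat).length := by
          rw [List.length_take]; omega
        have hdrop : (xs.take n.toNat).drop a.toNat
            = (xs[a.toNat]'halt) :: (xs.take n.toNat).drop (a + 1).toNat := by
          have h1 : (a + 1).toNat = a.toNat + 1 := by omega
          rw [h1]
          have := List.drop_eq_getElem_cons htlt
          simpa [List.getElem_take] using this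
        rw [aLoop, dif_pos hlt]
        by_cases hc : (xs[a.toNat]'halt) > bal * 2
        · simp [hget, hdrop, hc, aList]
        · have hih := ih (a + 1) (by omega) (by omega) (bal * 2 - xs[a.toNat]'halt)
          simp [hget, hdrop, hc, aList, hih]
      · rw [aLoop, dif_neg hlt]
        have hnil : (xs.take n.toNat).drop a.toNat = [] := by
          apply List.drop_eq_nil_of_le
          have := List.length_take_le n.toNat xs
          omega
        rw [hnil, aList]

theorem bPhase2_eq_mfold (xs : List Int) (n : Int) (hn : n ≤ (xs.length : Int)) :
    ∀ (k : Nat) (a : Int), 0 ≤ a → n - a ≤ (k : Int) →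
      ∀ m, bPhase2 xs n a m = some (mfold ((xs.take n.toNat).drop a.toNat) m) := by
  intro k
  induction k with
  | zero =>
      intro a ha hk m
      have hna : ¬ a < n := by omega
      rw [bPhase2, dif_neg hna]
      have hnil : (xs.take n.toNat).drop a.toNat = [] := by
        apply List.drop_eq_nil_of_le
        have := List.length_take_le n.toNat xs
        omega
      rw [hnil, mfold, List.foldl_nil]
  | succ k ih =>
      intro a ha hk m
      by_cases hlt : a < n
      · have halt : a.toNat < xs.length := by omega
        have hget : PySem.List.pyGet? xs a = some (xs[a.toNat]'halt) := by
          rw [PySem.List.pyGet?_of_nonneg xs ha]; exact List.getElem?_eq_getElem halt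
        have htlt : a.toNat < (xs.take n.toNat).length := by
          rw [List.length_take]; omega
        have hdrop : (xs.take n.toNat).drop a.toNat
            = (xs[a.toNat]'halt) :: (xs.take n.toNat).drop (a + 1).toNat := by
          have h1 : (a + 1).toNat = a.toNat + 1 := by omega
          rw [h1]
          have := List.drop_eq_getElem_cons htlt
          simpa [List.getElem_take] using this
        have hih := ih (a + 1) (by omega) (by omega)
          (PySem.Int.mod (m * 2 - xs[a.toNat]'halt) (10 ^ 9 + 7))
        rw [bPhase2, dif_pos hlt]
        simp only [hget]
        rw [hdrop]
        simp only [mfold, List.foldl_cons] at hih ⊢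
        exact hih
      · rw [bPhase2, dif_neg hlt]
        have hnil : (xs.take n.toNat).drop a.toNat = [] := by
          apply List.drop_eq_nil_of_le
          have := List.length_take_le n.toNat xs
          omega
        rw [hnil, mfold, List.foldl_nil]

theorem bPhase1_eq_bExactL (xs : List Int) (n : Int) (hn : n ≤ (xs.length : Int)) :
    ∀ (k : Nat) (a : Int), 0 ≤ a → n - a ≤ (k : Int) → ∀ bal,
      (match bExactL ((xs.take n.toNat).drop a.toNat) bal with
       | none => bPhase1 xs n a bal = some none
       | some (rest, b) => ∃ j, bPhase1 xs n a bal = some (some (j, b)) ∧ 0 ≤ j ∧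
           (xs.take n.toNat).drop j.toNat = rest) := by
  intro k
  induction k with
  | zero =>
      intro a ha hk bal
      have hna : ¬ a < n := by omega
      have hnil : (xs.take n.toNat).drop a.toNat = [] := by
        apply List.drop_eq_nil_of_le
        have := List.length_take_le n.toNat xs
        omega
      rw [hnil, bExactL]
      exact ⟨a, by rw [bPhase1, dif_neg (by omega)], ha, hnil⟩
  | succ k ih =>
      intro a ha hk bal
      by_cases hlt : a < n
      · have halt : a.toNat < xs.length := by omega
        have hget : PySem.List.pyGet? xs a = some (xs[a.toNat]'halt) := by
          rw [PySem.List.pyGet?_of_nonneg xs ha]; exact List.getElem?_eq_getElem halt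
        have htlt : a.toNat < (xs.take n.toNat).length := by
          rw [List.length_take]; omega
        have hdrop : (xs.take n.toNat).drop a.toNat
            = (xs[a.toNat]'halt) :: (xs.take n.toNat).drop (a + 1).toNat := by
          have h1 : (a + 1).toNat = a.toNat + 1 := by omega
          rw [h1]
          have := List.drop_eq_getElem_cons htlt
          simpa [List.getElem_take] using this
        by_cases hcap : bal ≤ 2147483648
        · rw [hdrop, bExactL, if_pos hcap]
          by_cases hc : (xs[a.toNat]'halt) > bal * 2
          · rw [if_pos hc, bPhase1, dif_pos ⟨hlt, hcap⟩]
            simp [hget, hc]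
          · rw [if_neg hc]
            have hih := ih (a + 1) (by omega) (by omega) (bal * 2 - xs[a.toNat]'halt)
            rcases hrec : bExactL ((xs.take n.toNat).drop (a + 1).toNat)
                (bal * 2 - xs[a.toNat]'halt) with _ | ⟨rest, b⟩
            · rw [hrec] at hih
              rw [bPhase1, dif_pos ⟨hlt, hcap⟩]
              simp only [hget]
              simpa [hc] using hih
            · rw [hrec] at hih
              obtain ⟨j, hj1, hj2, hj3⟩ := hih
              refine ⟨j, ?_, hj2, hj3⟩
              rw [bPhase1, dif_pos ⟨hlt, hcap⟩]
              simp only [hget]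
              simpa [hc] using hj1
        · rw [hdrop, bExactL, if_neg hcap]
          exact ⟨a, by rw [bPhase1, dif_neg (by tauto)], ha, hdrop⟩
      · have hnil : (xs.take n.toNat).drop a.toNat = [] := by
          apply List.drop_eq_nil_of_le
          have := List.length_take_le n.toNat xs
          omega
        rw [hnil, bExactL]
        exact ⟨a, by rw [bPhase1, dif_neg (by tauto)], ha, hnil⟩

-- once the balance exceeds 2^31 ≥ every experiment value, the error test never fires
theorem aList_big : ∀ (l : List Int) (bal : Int),
    (∀ u ∈ l, u ≤ 2147483648) → 2147483648 < bal →
    aList l bal = PySem.Int.toStr (mfold l (PySem.Int.mod bal (10 ^ 9 + 7))) := by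
  intro l
  induction l with
  | nil => intro bal _ _; simp [aList, mfold]
  | cons u r ih =>
      intro bal hb hbig
      have hu : u ≤ 2147483648 := hb u (by simp)
      have hne : ¬ u > bal * 2 := by omega
      rw [aList, if_neg hne]
      rw [ih (bal * 2 - u) (fun x hx => hb x (by simp [hx])) (by omega)]
      congr 1
      show mfold r (PySem.Int.mod (bal * 2 - u) (10 ^ 9 + 7)) = mfold (u :: r) (PySem.Int.mod bal (10 ^ 9 + 7))
      have hP : (0 : Int) < 10 ^ 9 + 7 := by norm_num
      simp only [mfold, List.foldl_cons]
      congr 1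
      rw [PySem.Int.mod_eq_emod_of_pos hP, PySem.Int.mod_eq_emod_of_pos hP,
          PySem.Int.mod_eq_emod_of_pos hP]
      conv_rhs => rw [Int.sub_emod, Int.mul_emod, Int.emod_emod_of_dvd _ dvd_rfl,
        ← Int.mul_emod, ← Int.sub_emod]

theorem aList_eq_b : ∀ (l : List Int) (bal : Int),
    (∀ u ∈ l, u ≤ 2147483648) →
    aList l bal = (match bExactL l bal with
      | none => "error"
      | some (rest, b) => PySem.Int.toStr (mfold rest (PySem.Int.mod b (10 ^ 9 + 7)))) := by
  intro l
  induction l with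
  | nil => intro bal _; simp [aList, bExactL, mfold]
  | cons u r ih =>
      intro bal hb
      by_cases hcap : bal ≤ 2147483648
      · rw [aList, bExactL, if_pos hcap]
        by_cases hc : u > bal * 2
        · simp [hc]
        · rw [if_neg hc, if_neg hc]
          exact ih (bal * 2 - u) (fun x hx => hb x (by simp [hx]))
      · rw [bExactL, if_neg hcap]
        exact aList_big (u :: r) bal hb (by omega)

-- the equivalence on the inputs the loop fully reads (n ≤ len)
theorem main_le (n : Int) (xs : List Int) (hbound : ∀ u ∈ xs, u ≤ 2147483648)
    (hpre : n ≤ (xs.length : Int)) : bacteria_left n xs = bacteria_left_alt n xs := by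
  unfold bacteria_left bacteria_left_alt
  by_cases hn : 0 ≤ n
  · have hA := aLoop_eq_aList xs n hpre n.toNat 0 (le_refl 0) (by omega) 1
    have hB := bPhase1_eq_bExactL xs n hpre n.toNat 0 (le_refl 0) (by omega) 1
    rw [hA]
    have hbt : ∀ u ∈ xs.take n.toNat, u ≤ 2147483648 :=
      fun u hu => hbound u (List.mem_of_mem_take hu)
    rw [aList_eq_b ((xs.take n.toNat).drop (0:Int).toNat) 1 (by simpa using hbt)]
    rcases hE : bExactL ((xs.take n.toNat).drop (0:Int).toNat) 1 with _ | ⟨rest, b⟩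
    · rw [hE] at hB
      rw [hB]
    · rw [hE] at hB
      obtain ⟨j, hj1, hj2, hj3⟩ := hB
      rw [hj1]
      have hM := bPhase2_eq_mfold xs n hpre n.toNat j hj2 (by omega)
        (PySem.Int.mod b (10 ^ 9 + 7))
      show PySem.Int.toStr (mfold rest (PySem.Int.mod b (10 ^ 9 + 7)))
        = (Option.map PySem.Int.toStr (bPhase2 xs n j (PySem.Int.mod b (10 ^ 9 + 7)))).getD ""
      rw [hM, hj3]
      rfl
  · rw [aLoop, dif_neg (by omega : ¬ (0:Int) < n),
        bPhase1, dif_neg (by omega : ¬ ((0:Int) < n ∧ (1:Int) ≤ 2147483648))]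
    show PySem.Int.toStr (PySem.Int.mod 1 (10 ^ 9 + 7))
      = (Option.map PySem.Int.toStr (bPhase2 xs n 0 (PySem.Int.mod 1 (10 ^ 9 + 7)))).getD ""
    rw [bPhase2, dif_neg (by omega : ¬ (0:Int) < n)]
    rfl

-- ===== VERDICT (by name: the statement is the Claim_ definition above) =====
theorem bacteria_left_spec : Claim_equal_bacteria_left := by
  intro n xs hdom hpre
  have hbound : ∀ u ∈ xs, u ≤ 2147483648 := by
    intro u hu
    unfold Dom_bacteria_left at hdom
    simp [pvDomInt, List.all_eq_true] at hdom
    exact (hdom.2 u hu).2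
  unfold Spec_bacteria_left
  by_cases hnl : n ≤ (xs.length : Int)
  · exact main_le n xs hbound hnl
  · have hex : ∃ k ∈ List.range xs.length,
        xs.getD k 0 > ((2 ^ (k + 1) : Nat) : Int)
          - (((List.range k).map (fun i => ((2 ^ (k - i) : Nat) : Int) * xs.getD i 0)).sum) := by
      rcases hpre with h | h
      · exact absurd h hnl
      · exact h
    have herr : errs xs 1 := by
      apply (errs_iff xs 1).2
      simpa [mul_one] using hex
    have hlt : (xs.length : Int) < n := by omega
    have hA := aLoop_err xs 1 xs n 0 (le_refl 0) (by simp) hlt herr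
    have hB := bPhase1_err xs 1 xs n 0 (le_refl 0) (by simp) hlt hbound herr
    unfold bacteria_left bacteria_left_alt
    rw [hA, hB]
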